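-- pv_equiv track=rewrite | github.com/JuanSilva2000/CC3S2-Desarrollo-de-Software | Actividades/Actividad-Cobertura-código/count_words.py | count
-- ===== SOURCE A (Python) =====
-- def count(s: str) -> int:
--     words = 0
--     last = ' '
--     string = s.lower() #cambiar a minuscula
--
--     for char in string:
--         if not char.isalpha() and (last == 's' or last == 'r'):
--             words += 1
--         last = char
--
--     if last == 'r' or last == 's':
--         words += 1
--
--     return words
-- ===== SOURCE B (Python) =====
-- def count(s: str) -> int:
--     t = s.lower()
--     words = []
--     cur = ""
--     for ch in t:
--         if ch.isalpha():
--             cur += ch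
--         else:
--             if cur:
--                 words.append(cur)
--             cur = ""
--     if cur:
--         words.append(cur)
--     return sum(1 for w in words if w[-1] in 'sr')
-- ===== Notes on version B (the rewrite author's own statement) =====
-- stated objective: alternative
-- what changed: B tokenizes the lowered string into an explicit list of words (flushing runs of alphabetic characters) and then counts, in a separate pass, the words whose final character is one of the two target letters, instead of A's single streaming pass that tracks only the previous character.
import Mathlib
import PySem

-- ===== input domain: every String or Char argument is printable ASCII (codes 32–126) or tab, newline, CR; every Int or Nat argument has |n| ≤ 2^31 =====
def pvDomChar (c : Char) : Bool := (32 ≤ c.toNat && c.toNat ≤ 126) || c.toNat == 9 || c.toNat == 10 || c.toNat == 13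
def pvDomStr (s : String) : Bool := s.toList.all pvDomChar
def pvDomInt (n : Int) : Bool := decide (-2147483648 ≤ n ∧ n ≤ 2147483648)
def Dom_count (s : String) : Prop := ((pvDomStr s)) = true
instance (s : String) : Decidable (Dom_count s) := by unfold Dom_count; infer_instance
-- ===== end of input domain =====

-- B tokenizes into an explicit word list and counts in a second pass; same O(n) cost, different decomposition.

-- ===== PORT A =====
def count (s : String) : Int :=
  let string := PySem.Str.lower s
  let st := string.toList.foldl
    (fun (acc : Int × Char) char =>
      ((if !(PySem.Chars.isalpha char) && (acc.2 == 's' || acc.2 == 'r')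
        then acc.1 + 1 else acc.1), char))
    (0, ' ')
  if st.2 == 'r' || st.2 == 's' then st.1 + 1 else st.1

-- ===== PORT B =====
def count_alt (s : String) : Int :=
  let t := PySem.Str.lower s
  let st := t.toList.foldl
    (fun (acc : List (List Char) × List Char) ch =>
      if PySem.Chars.isalpha ch then (acc.1, acc.2 ++ [ch])
      else if acc.2 ≠ [] then (acc.1 ++ [acc.2], ([] : List Char))
      else (acc.1, ([] : List Char)))
    ([], [])
  let words := if st.2 ≠ [] then st.1 ++ [st.2] else st.1
  ((words.countP (fun w =>
      match PySem.List.pyGet? w (-1) with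
      | some c => c == 's' || c == 'r'
      | none => false) : Nat) : Int)

-- ===== PRECONDITION & SPEC =====
def Spec_count (s : String) (out : Int) : Prop := out = count_alt s
instance (s : String) (out : Int) : Decidable (Spec_count s out) := by unfold Spec_count; infer_instance

-- ===== CLAIM (what is proved, stated in full; the proofs are below) =====
def Claim_equal_count : Prop := ∀ (s : String), Dom_count s → Spec_count s (count s)

-- ===== LEMMAS AND PROOFS =====

-- the counting predicate of B's second pass
def pvEnds (w : List Char) : Bool :=
  match PySem.List.pyGet? w (-1) with
  | some c => c == 's' || c == 'r'
  | none => false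

lemma pvEnds_concat (w : List Char) (c : Char) :
    pvEnds (w ++ [c]) = (c == 's' || c == 'r') := by
  simp [pvEnds, PySem.List.pyGet?_neg_one]

lemma pvHot_isalpha (c : Char) (h : (c == 's' || c == 'r') = true) :
    PySem.Chars.isalpha c = true := by
  rcases Bool.or_eq_true_iff.mp h with h' | h' <;>
    simp_all [beq_iff_eq] <;> decide

lemma pv_loop (cs : List Char) : ∀ (w : Int) (last : Char)
    (ws : List (List Char)) (cur : List Char),
    w = (ws.countP pvEnds : Int) →
    (last == 's' || last == 'r') = pvEnds cur →
    (let st := cs.foldl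
        (fun (acc : Int × Char) char =>
          ((if !(PySem.Chars.isalpha char) && (acc.2 == 's' || acc.2 == 'r')
            then acc.1 + 1 else acc.1), char)) (w, last);
      if st.2 == 'r' || st.2 == 's' then st.1 + 1 else st.1)
    = (let st := cs.foldl
        (fun (acc : List (List Char) × List Char) ch =>
          if PySem.Chars.isalpha ch then (acc.1, acc.2 ++ [ch])
          else if acc.2 ≠ [] then (acc.1 ++ [acc.2], ([] : List Char))
          else (acc.1, ([] : List Char))) (ws, cur);
        (((if st.2 ≠ [] then st.1 ++ [st.2] else st.1).countP pvEnds : Nat) : Int)) := by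
  induction cs with
  | nil =>
    intro w last ws cur hw hinv
    simp only [List.foldl_nil]
    by_cases hc : cur = []
    · subst hc
      have : (last == 's' || last == 'r') = false := by simpa [pvEnds, PySem.List.pyGet?] using hinv
      have h1 : (last == 's') = false := by rcases Bool.or_eq_false_iff.mp this with ⟨a, b⟩; exact a
      have h2 : (last == 'r') = false := by rcases Bool.or_eq_false_iff.mp this with ⟨a, b⟩; exact b
      simp [h1, h2, hw]
    · have : (last == 'r' || last == 's') = pvEnds cur := by
        rw [← hinv, Bool.or_comm]
      simp only [hc, ite_not]
      rw [this]
      by_cases hp : pvEnds cur = true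
      · simp [hp, List.countP_append, hw]
      · have hp' : pvEnds cur = false := by simpa using hp
        simp [hp', List.countP_append, hw]
  | cons ch cs ih =>
    intro w last ws cur hw hinv
    simp only [List.foldl_cons]
    by_cases ha : PySem.Chars.isalpha ch = true
    · have hA : (!(PySem.Chars.isalpha ch) && (last == 's' || last == 'r')) = false := by
        simp [ha]
      rw [hA]
      simp only [ha, if_true]
      exact ih w ch ws (cur ++ [ch]) hw (by rw [pvEnds_concat])
    · have ha' : PySem.Chars.isalpha ch = false := by simpa using ha
      have hch : (ch == 's' || ch == 'r') = false := by
        by_contra h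
        exact ha (pvHot_isalpha ch (by simpa using Bool.of_not_eq_false h))
      by_cases hc : cur = []
      · subst hc
        have hlast : (last == 's' || last == 'r') = false := by
          simpa [pvEnds, PySem.List.pyGet?] using hinv
        rw [ha', hlast]
        simp only [Bool.not_false, Bool.and_false, if_false, ne_eq, not_true_eq_false, Bool.false_eq_true]
        exact ih w ch ws [] hw (by simp [pvEnds, PySem.List.pyGet?, hch])
      · have hcur : pvEnds cur = (last == 's' || last == 'r') := hinv.symm
        rw [ha']
        simp only [Bool.not_false, Bool.true_and, Bool.false_eq_true, if_false, ne_eq, hc,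
          not_false_eq_true, if_true]
        have hstep : (if (last == 's' || last == 'r') = true then w + 1 else w)
            = (((ws ++ [cur]).countP pvEnds : Nat) : Int) := by
          rw [← hcur]
          by_cases hp : pvEnds cur = true
          · simp [hp, List.countP_append, hw]
          · have hp' : pvEnds cur = false := by simpa using hp
            simp [hp', List.countP_append, hw]
        exact ih _ ch (ws ++ [cur]) [] hstep (by simp [pvEnds, PySem.List.pyGet?, hch])

-- ===== VERDICT (by name: the statement is the Claim_ definition above) =====
theorem count_spec : Claim_equal_count := by
  intro s _
  unfold Spec_count count count_alt
  exact pv_loop (PySem.Str.lower s).toList 0 ' ' [] [] (by simp)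
    (by simp [pvEnds, PySem.List.pyGet?])
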